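-- pv_equiv track=rewrite | github.com/MasterGX04/kpop-voice-recognition | VoicePredictor.py | cleanShortSingers
-- ===== SOURCE A (Python) =====
-- def cleanShortSingers(predictions, minStreak=8):
--     """
--     Remove singers who never appear for at least `minStreak` consecutive chunks.
--
--     Parameters:
--         predictions (list of list of str): Each entry is a list of singer names for a chunk,
--                                         e.g., [["Leeseo"], ["Leeseo", "Wonyoung"], ...]
--
--         minStreak (int): Minimum number of consecutive detections required to keep a singer
--
--     Returns:
--         list of list of str: Cleaned predictions with short streak singers removed
--     """
--     from collections import defaultdict
--      # Track current streaks and all short ranges to delete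
--     currentStreaks = defaultdict(lambda: {"start": None, "length": 0})
--     rangesToRemove = defaultdict(list)
--
--     for idx, chunk in enumerate(predictions):
--         currentSingers = set(chunk)
--
--         # End any streaks for singers no longer in current chunk
--         for singer in list(currentStreaks.keys()):
--             if singer not in currentSingers and currentStreaks[singer]["length"] > 0:
--                 start = currentStreaks[singer]["start"]
--                 length = currentStreaks[singer]["length"]
--                 if start is not None and length <= minStreak:
--                     rangesToRemove[singer].append((start, idx - 1))
--                 currentStreaks[singer]["start"] = None
--                 currentStreaks[singer]["length"] = 0
--
--         # Continue streaks for singers in current chunk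
--         for singer in currentSingers:
--             if currentStreaks[singer]["length"] == 0:
--                 currentStreaks[singer]["start"] = idx
--             currentStreaks[singer]["length"] += 1
--
--     # Handle any lingering streaks at the end
--     for singer, data in currentStreaks.items():
--         if data["length"] > 0 and data["length"] <= minStreak and data["start"] is not None:
--             endIdx = data["start"] + data["length"] - 1
--             rangesToRemove[singer].append((data["start"], endIdx))
--
--     # Deep copy predictions
--     cleaned = [chunk.copy() for chunk in predictions]
--
--     # Apply deletions based on ranges
--     for singer, ranges in rangesToRemove.items():
--         for start, end in ranges:
--             for i in range(start, end + 1):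
--                 if singer in cleaned[i]:
--                     cleaned[i] = [s for s in cleaned[i] if s != singer]
--
--     # Replace empty chunks with ["None"]
--     for i in range(len(cleaned)):
--         if not cleaned[i]:
--             cleaned[i] = ["None"]
--
--     return cleaned
-- ===== SOURCE B (Python) =====
-- def cleanShortSingers(predictions, minStreak=8):
--     """Per-occurrence re-implementation: for each singer occurrence, compute the length of
--     the maximal consecutive run of chunks containing that singer and keep it only if
--     that length exceeds minStreak; empty chunks become ["None"]."""
--     n = len(predictions)
--     sets = [set(c) for c in predictions]
--
--     def runlen(i, s):
--         j = i
--         while j > 0 and s in sets[j - 1]: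
--             j -= 1
--         k = i
--         while k < n - 1 and s in sets[k + 1]:
--             k += 1
--         return k - j + 1
--
--     cleaned = []
--     for i, chunk in enumerate(predictions):
--         kept = [s for s in chunk if runlen(i, s) > minStreak]
--         cleaned.append(kept if kept else ["None"])
--     return cleaned
-- ===== Notes on version B (the rewrite author's own statement) =====
-- stated objective: faster
-- what changed: A tracks per-singer streak state across the whole pass (iterating every tracked singer at every chunk) plus a ranges-to-delete table and then mutates a copy range by range; B instead computes, for each singer occurrence, the length of its maximal consecutive run directly by scanning left and right, and filters each chunk in one comprehension.
import Mathlib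
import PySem

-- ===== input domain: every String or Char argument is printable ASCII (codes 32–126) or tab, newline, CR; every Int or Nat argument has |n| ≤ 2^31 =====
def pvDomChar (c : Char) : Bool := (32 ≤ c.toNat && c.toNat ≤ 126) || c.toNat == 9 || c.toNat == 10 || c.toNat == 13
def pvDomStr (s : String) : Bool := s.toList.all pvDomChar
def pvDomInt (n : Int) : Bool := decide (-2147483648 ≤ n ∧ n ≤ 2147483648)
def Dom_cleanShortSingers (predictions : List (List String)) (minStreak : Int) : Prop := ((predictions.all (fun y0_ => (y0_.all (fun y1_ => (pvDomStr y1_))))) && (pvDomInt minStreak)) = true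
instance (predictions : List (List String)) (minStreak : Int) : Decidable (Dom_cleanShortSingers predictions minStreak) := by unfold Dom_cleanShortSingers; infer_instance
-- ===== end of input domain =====

-- B replaces A's streak-state + deletion-ranges machinery (which rescans every tracked
-- singer at every chunk) by a direct per-occurrence computation of the maximal consecutive
-- run length; same return value, measured faster in a timing run on generated inputs.

-- ===== PORT A =====
-- One chunk of A's main loop: the keys-loop ending streaks, then the current-singers loop.
-- (The Python iterates `currentSingers` — a set — and `dict.keys()`; the final return value is
-- independent of those iteration orders, which PySem does not model; we iterate in PySem.Set /
-- PySem.Dict insertion order.)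
def pvA_step (minStreak : Int)
    (st : PySem.Dict String (Option Int × Int) × PySem.Dict String (List (Int × Int)))
    (p : Int × List String) :
    PySem.Dict String (Option Int × Int) × PySem.Dict String (List (Int × Int)) :=
  let currentSingers := PySem.Set.ofList p.2
  let st1 := st.1.keys.foldl (fun st2 singer =>
      let v := st2.1.getD singer (none, 0)
      if PySem.Set.contains currentSingers singer = false ∧ 0 < v.2 then
        let rr := match v.1 with
          | some start =>
              if v.2 ≤ minStreak then st2.2.modify singer [] (fun l => l ++ [(start, p.1 - 1)])
              else st2.2
          | none => st2.2
        (st2.1.insert singer (none, 0), rr)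
      else st2) st
  (currentSingers.foldl (fun cs singer =>
      let v := cs.getD singer (none, 0)
      let v := if v.2 = 0 then (some p.1, v.2) else v
      cs.insert singer (v.1, v.2 + 1)) st1.1, st1.2)

-- All list indices reached by the deletion loops are provably in range (ranges are recorded
-- inside [0, len(predictions))), so the total forms pyGetD/pySetD are exact here.
def cleanShortSingers (predictions : List (List String)) (minStreak : Int) : List (List String) :=
  let st := (PySem.List.enumerate predictions 0).foldl (pvA_step minStreak)
      (PySem.Dict.empty, PySem.Dict.empty)
  let rr := st.1.items.foldl (fun rr kv =>
      if 0 < kv.2.2 ∧ kv.2.2 ≤ minStreak then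
        match kv.2.1 with
        | some start => rr.modify kv.1 [] (fun l => l ++ [(start, start + kv.2.2 - 1)])
        | none => rr
      else rr) st.2
  let cleaned := predictions.map (fun chunk => chunk)
  let cleaned := rr.items.foldl (fun cleaned kv =>
      kv.2.foldl (fun cleaned r =>
        (PySem.List.pyRange r.1 (r.2 + 1) 1).foldl (fun cleaned i =>
          if kv.1 ∈ PySem.List.pyGetD cleaned i [] then
            PySem.List.pySetD cleaned i
              (List.filter (fun s => decide (s ≠ kv.1)) (PySem.List.pyGetD cleaned i []))
          else cleaned) cleaned) cleaned) cleaned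
  (PySem.List.pyRange 0 (cleaned.length : Int) 1).foldl (fun cleaned i =>
      if PySem.List.pyGetD cleaned i [] = [] then PySem.List.pySetD cleaned i ["None"]
      else cleaned) cleaned

-- ===== PORT B =====
-- `while j > 0 and s in sets[j-1]: j -= 1` — number of consecutive chunks just before j containing s.
def pvB_back (sets : List (PySem.Set String)) (s : String) : Nat → Nat
  | 0 => 0
  | j + 1 => if PySem.Set.contains (sets.getD j PySem.Set.empty) s then pvB_back sets s j + 1 else 0

-- `while k < n-1 and s in sets[k+1]: k += 1` — number of consecutive chunks just after k containing s.
def pvB_fwd (sets : List (PySem.Set String)) (s : String) (k : Nat) : Nat :=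
  if h : k + 1 < sets.length ∧ PySem.Set.contains (sets.getD (k + 1) PySem.Set.empty) s then
    pvB_fwd sets s (k + 1) + 1
  else 0
termination_by sets.length - k

def cleanShortSingers_alt (predictions : List (List String)) (minStreak : Int) : List (List String) :=
  let sets := predictions.map PySem.Set.ofList
  (PySem.List.enumerate predictions 0).map (fun p =>
    let kept := p.2.filter (fun s =>
      decide (minStreak < ((pvB_back sets s p.1.toNat + 1 + pvB_fwd sets s p.1.toNat : Nat) : Int)))
    if kept = [] then ["None"] else kept)

-- ===== PRECONDITION & SPEC =====
def Spec_cleanShortSingers (predictions : List (List String)) (minStreak : Int) (out : List (List String)) : Prop := out = cleanShortSingers_alt predictions minStreak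
instance (predictions : List (List String)) (minStreak : Int) (out : List (List String)) : Decidable (Spec_cleanShortSingers predictions minStreak out) := by unfold Spec_cleanShortSingers; infer_instance

-- ===== CLAIM (what is proved, stated in full; the proofs are below) =====
def Claim_equal_cleanShortSingers : Prop := ∀ (predictions : List (List String)) (minStreak : Int), Dom_cleanShortSingers predictions minStreak → Spec_cleanShortSingers predictions minStreak (cleanShortSingers predictions minStreak)

-- ===== LEMMAS AND PROOFS =====

-- `runE preds s t` = length of the streak of s in chunks …, t-2, t-1 (ending just before t);
-- `runF preds s k` = length of the streak of s in chunks k+1, k+2, … (starting just after k).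
def runE (preds : List (List String)) (s : String) : Nat → Nat
  | 0 => 0
  | t + 1 => if s ∈ preds.getD t [] then runE preds s t + 1 else 0

def runF (preds : List (List String)) (s : String) (k : Nat) : Nat :=
  if k + 1 < preds.length ∧ s ∈ preds.getD (k + 1) [] then runF preds s (k + 1) + 1 else 0
termination_by preds.length - k
decreasing_by omega

theorem runF_def (preds : List (List String)) (s : String) (k : Nat) :
    runF preds s k = if k + 1 < preds.length ∧ s ∈ preds.getD (k + 1) [] then runF preds s (k + 1) + 1 else 0 := by
  conv_lhs => rw [runF]

theorem mem_getD_lt (preds : List (List String)) (s : String) (i : Nat)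
    (h : s ∈ preds.getD i []) : i < preds.length := by
  by_contra hn
  rw [List.getD_eq_default] at h
  · exact absurd h (List.not_mem_nil)
  · omega

theorem runE_le (preds : List (List String)) (s : String) (t : Nat) : runE preds s t ≤ t := by
  induction t with
  | zero => simp [runE]
  | succ t ih => simp only [runE]; split <;> omega

theorem runE_pos_iff (preds : List (List String)) (s : String) (t : Nat) :
    0 < runE preds s (t + 1) ↔ s ∈ preds.getD t [] := by
  simp only [runE]; split <;> simp_all

theorem sets_getD (preds : List (List String)) (j : Nat) :
    (preds.map PySem.Set.ofList).getD j PySem.Set.empty = PySem.Set.ofList (preds.getD j []) :=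
  List.getD_map preds [] PySem.Set.ofList

theorem contains_sets (preds : List (List String)) (s : String) (j : Nat) :
    (PySem.Set.contains ((preds.map PySem.Set.ofList).getD j PySem.Set.empty) s = true)
      ↔ s ∈ preds.getD j [] := by
  rw [sets_getD]
  rw [PySem.Set.contains_iff, PySem.Set.mem_ofList]

theorem back_eq (preds : List (List String)) (s : String) (j : Nat) :
    pvB_back (preds.map PySem.Set.ofList) s j = runE preds s j := by
  induction j with
  | zero => rfl
  | succ j ih =>
    have hc := contains_sets preds s j
    simp only [pvB_back, runE]
    by_cases hm : s ∈ preds.getD j []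
    · rw [if_pos (hc.mpr hm), if_pos hm, ih]
    · rw [if_neg (fun h => hm (hc.mp h)), if_neg hm]

theorem fwd_eq (preds : List (List String)) (s : String) (k : Nat) :
    pvB_fwd (preds.map PySem.Set.ofList) s k = runF preds s k := by
  suffices h : ∀ f k, preds.length - k ≤ f → pvB_fwd (preds.map PySem.Set.ofList) s k = runF preds s k from
    h _ k le_rfl
  intro f
  induction f with
  | zero =>
    intro k hk
    rw [pvB_fwd, runF_def, List.length_map]
    have hb : ¬ (k + 1 < preds.length) := by omega
    rw [dif_neg (fun h => hb h.1), if_neg (fun h => hb h.1)]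
  | succ f ih =>
    intro k hk
    rw [pvB_fwd, runF_def, List.length_map]
    have hc := contains_sets preds s (k + 1)
    by_cases hb : k + 1 < preds.length
    · by_cases hm : s ∈ preds.getD (k + 1) []
      · rw [dif_pos ⟨hb, hc.mpr hm⟩, if_pos ⟨hb, hm⟩, ih (k + 1) (by omega)]
      · rw [dif_neg (fun h => hm (hc.mp h.2)), if_neg (fun h => hm h.2)]
    · rw [dif_neg (fun h => hb h.1), if_neg (fun h => hb h.1)]

-- membership everywhere inside a backward run
theorem run_mem_back (preds : List (List String)) (s : String) :
    ∀ (d b : Nat), d < runE preds s (b + 1) → s ∈ preds.getD (b - d) [] := by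
  intro d
  induction d with
  | zero =>
    intro b h
    exact (runE_pos_iff preds s b).mp h
  | succ d ih =>
    intro b h
    have hm : s ∈ preds.getD b [] := (runE_pos_iff preds s b).mp (by omega)
    have hE : runE preds s (b + 1) = runE preds s b + 1 := by
      simp only [runE]; rw [if_pos hm]
    have hpos : 0 < runE preds s b := by omega
    have hb : 0 < b := by
      by_contra h0
      have hb0 : b = 0 := by omega
      subst hb0
      simp only [runE] at hpos
      omega
    obtain ⟨b', rfl⟩ : ∃ b', b = b' + 1 := ⟨b - 1, by omega⟩
    have : d < runE preds s (b' + 1) := by omega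
    have := ih b' this
    simpa [Nat.succ_sub_succ] using this

-- membership everywhere inside a forward run
theorem run_mem_fwd (preds : List (List String)) (s : String) :
    ∀ (d i : Nat), d ≤ runF preds s i → s ∈ preds.getD i [] → s ∈ preds.getD (i + d) [] := by
  intro d
  induction d with
  | zero => intro i _ h; simpa using h
  | succ d ih =>
    intro i hd hm
    rw [runF_def] at hd
    by_cases hc : i + 1 < preds.length ∧ s ∈ preds.getD (i + 1) []
    · rw [if_pos hc] at hd
      have := ih (i + 1) (by omega) hc.2
      rw [show i + (d + 1) = (i + 1) + d by omega]
      exact this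
    · rw [if_neg hc] at hd; omega

theorem runF_end (preds : List (List String)) (s : String) (i : Nat) :
    runF preds s (i + runF preds s i) = 0 := by
  suffices h : ∀ f i, preds.length - i ≤ f → runF preds s (i + runF preds s i) = 0 from h _ i le_rfl
  intro f
  induction f with
  | zero =>
    intro i hi
    have h0 : runF preds s i = 0 := by
      rw [runF_def]
      have : ¬ (i + 1 < preds.length) := by omega
      simp [this]
    rw [h0, Nat.add_zero, h0]
  | succ f ih =>
    intro i hi
    by_cases hc : i + 1 < preds.length ∧ s ∈ preds.getD (i + 1) []
    · have hri : runF preds s i = runF preds s (i + 1) + 1 := by rw [runF_def, if_pos hc]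
      rw [hri, show i + (runF preds s (i + 1) + 1) = (i + 1) + runF preds s (i + 1) by omega]
      exact ih (i + 1) (by omega)
    · have h0 : runF preds s i = 0 := by rw [runF_def, if_neg hc]
      rw [h0, Nat.add_zero, h0]

-- the total run length is constant along a run
theorem tot_const (preds : List (List String)) (s : String) (i : Nat) :
    ∀ (d : Nat), (∀ k, k ≤ d → s ∈ preds.getD (i + k) []) →
      runE preds s (i + d + 1) + runF preds s (i + d) = runE preds s (i + 1) + runF preds s i := by
  intro d
  induction d with
  | zero => intro _; rfl
  | succ d ih =>
    intro hmem
    have hm1 : s ∈ preds.getD (i + d + 1) [] := by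
      have := hmem (d + 1) le_rfl
      simpa [show i + (d + 1) = i + d + 1 by omega] using this
    have hE : runE preds s (i + (d + 1) + 1) = runE preds s (i + d + 1) + 1 := by
      rw [show i + (d + 1) + 1 = (i + d + 1) + 1 by omega]
      simp only [runE]; rw [if_pos hm1]
    have hF : runF preds s (i + d) = runF preds s (i + d + 1) + 1 := by
      have hlt : i + d + 1 < preds.length := mem_getD_lt preds s _ hm1
      rw [runF_def, if_pos ⟨hlt, hm1⟩]
    have := ih (fun k hk => hmem k (by omega))
    rw [hE, show i + (d + 1) = i + d + 1 by omega]
    omega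


-- ---- pointwise description of A's two inner loops ----

def kStep (CS : PySem.Set String) (m idx : Int)
    (st2 : PySem.Dict String (Option Int × Int) × PySem.Dict String (List (Int × Int)))
    (singer : String) :
    PySem.Dict String (Option Int × Int) × PySem.Dict String (List (Int × Int)) :=
  let v := st2.1.getD singer (none, 0)
  if PySem.Set.contains CS singer = false ∧ 0 < v.2 then
    let rr := match v.1 with
      | some start =>
          if v.2 ≤ m then st2.2.modify singer [] (fun l => l ++ [(start, idx - 1)])
          else st2.2
      | none => st2.2
    (st2.1.insert singer (none, 0), rr)
  else st2

def kVal (CS : PySem.Set String) (m idx : Int) (s : String)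
    (v : Option Int × Int) (l : List (Int × Int)) : (Option Int × Int) × List (Int × Int) :=
  if PySem.Set.contains CS s = false ∧ 0 < v.2 then
    ((none, 0), match v.1 with
      | some start => if v.2 ≤ m then l ++ [(start, idx - 1)] else l
      | none => l)
  else (v, l)

theorem kStep_getD_self (CS : PySem.Set String) (m idx : Int) (st2) (s : String) :
    ((kStep CS m idx st2 s).1.getD s (none, 0), (kStep CS m idx st2 s).2.getD s [])
      = kVal CS m idx s (st2.1.getD s (none, 0)) (st2.2.getD s []) := by
  unfold kStep kVal
  by_cases hc : PySem.Set.contains CS s = false ∧ 0 < (st2.1.getD s (none, 0)).2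
  · simp only [if_pos hc]
    refine Prod.ext ?_ ?_
    · simp [PySem.Dict.getD_insert]
    · cases hv : (st2.1.getD s (none, 0)).1 with
      | none => rfl
      | some start =>
        simp only
        by_cases hs : (st2.1.getD s (none, 0)).2 ≤ m
        · simp [if_pos hs, PySem.Dict.getD_modify]
        · simp [if_neg hs]
  · simp only [if_neg hc]

theorem kStep_getD_other (CS : PySem.Set String) (m idx : Int) (st2) (k s : String) (hx : s ≠ k) :
    (kStep CS m idx st2 k).1.getD s (none, 0) = st2.1.getD s (none, 0)
      ∧ (kStep CS m idx st2 k).2.getD s [] = st2.2.getD s [] := by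
  unfold kStep
  by_cases hc : PySem.Set.contains CS k = false ∧ 0 < (st2.1.getD k (none, 0)).2
  · simp only [if_pos hc]
    refine ⟨PySem.Dict.getD_insert_of_ne _ _ _ hx, ?_⟩
    cases hv : (st2.1.getD k (none, 0)).1 with
    | none => rfl
    | some start =>
      simp only
      by_cases hs : (st2.1.getD k (none, 0)).2 ≤ m
      · simp only [if_pos hs]
        exact PySem.Dict.getD_modify_of_ne _ _ _ hx
      · simp only [if_neg hs]
  · simp only [if_neg hc]; exact ⟨trivial, trivial⟩

theorem nodup_keys_modify (d : PySem.Dict String (List (Int × Int))) (k : String)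
    (d0 : List (Int × Int)) (f : List (Int × Int) → List (Int × Int)) (h : d.keys.Nodup) :
    (d.modify k d0 f).keys.Nodup := by
  rw [PySem.Dict.keys_modify]
  exact PySem.Dict.nodup_keys_insert _ _ _ h

theorem kStep_nodup (CS : PySem.Set String) (m idx : Int) (st2) (k : String)
    (h1 : st2.1.keys.Nodup) (h2 : st2.2.keys.Nodup) :
    (kStep CS m idx st2 k).1.keys.Nodup ∧ (kStep CS m idx st2 k).2.keys.Nodup := by
  unfold kStep
  by_cases hc : PySem.Set.contains CS k = false ∧ 0 < (st2.1.getD k (none, 0)).2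
  · simp only [if_pos hc]
    refine ⟨PySem.Dict.nodup_keys_insert _ _ _ h1, ?_⟩
    cases hv : (st2.1.getD k (none, 0)).1 with
    | none => exact h2
    | some start =>
      simp only
      by_cases hs : (st2.1.getD k (none, 0)).2 ≤ m
      · simp only [if_pos hs]
        exact nodup_keys_modify _ _ _ _ h2
      · simp only [if_neg hs]; exact h2
  · simp only [if_neg hc]; exact ⟨h1, h2⟩

theorem keysfold_nodup (CS : PySem.Set String) (m idx : Int) :
    ∀ (ks : List String) (st2), st2.1.keys.Nodup → st2.2.keys.Nodup →
      (ks.foldl (kStep CS m idx) st2).1.keys.Nodup ∧ (ks.foldl (kStep CS m idx) st2).2.keys.Nodup := by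
  intro ks
  induction ks with
  | nil => intro st2 h1 h2; exact ⟨h1, h2⟩
  | cons k ks ih =>
    intro st2 h1 h2
    have := kStep_nodup CS m idx st2 k h1 h2
    exact ih _ this.1 this.2

theorem keysfold_pointwise (CS : PySem.Set String) (m idx : Int) :
    ∀ (ks : List String), ks.Nodup → ∀ (st2) (s : String),
      ((ks.foldl (kStep CS m idx) st2).1.getD s (none, 0),
       (ks.foldl (kStep CS m idx) st2).2.getD s [])
        = if s ∈ ks then kVal CS m idx s (st2.1.getD s (none, 0)) (st2.2.getD s [])
          else (st2.1.getD s (none, 0), st2.2.getD s []) := by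
  intro ks
  induction ks with
  | nil => intro _ st2 s; simp
  | cons k ks ih =>
    intro hnd st2 s
    have hnd' := List.nodup_cons.mp hnd
    simp only [List.foldl_cons]
    by_cases hs : s = k
    · subst hs
      rw [ih hnd'.2 _ s, if_neg hnd'.1, kStep_getD_self, if_pos List.mem_cons_self]
    · have ho := kStep_getD_other CS m idx st2 k s hs
      rw [ih hnd'.2 _ s, ho.1, ho.2]
      by_cases hin : s ∈ ks
      · rw [if_pos hin, if_pos (List.mem_cons_of_mem _ hin)]
      · rw [if_neg hin, if_neg (by simp [hs, hin])]

def sStep (idx : Int) (cs : PySem.Dict String (Option Int × Int)) (singer : String) :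
    PySem.Dict String (Option Int × Int) :=
  let v := cs.getD singer (none, 0)
  let v := if v.2 = 0 then (some idx, v.2) else v
  cs.insert singer (v.1, v.2 + 1)

def sVal (idx : Int) (v : Option Int × Int) : Option Int × Int :=
  if v.2 = 0 then (some idx, 1) else (v.1, v.2 + 1)

theorem sStep_getD_self (idx : Int) (cs) (s : String) :
    (sStep idx cs s).getD s (none, 0) = sVal idx (cs.getD s (none, 0)) := by
  unfold sStep sVal
  by_cases hz : (cs.getD s (none, 0)).2 = 0
  · simp [if_pos hz, hz]
  · simp [if_neg hz]

theorem sStep_getD_other (idx : Int) (cs) (k s : String) (hx : s ≠ k) :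
    (sStep idx cs k).getD s (none, 0) = cs.getD s (none, 0) := by
  unfold sStep
  exact PySem.Dict.getD_insert_of_ne _ _ _ hx

theorem singersfold_pointwise (idx : Int) :
    ∀ (xs : List String), xs.Nodup → ∀ (cs) (s : String),
      (xs.foldl (sStep idx) cs).getD s (none, 0)
        = if s ∈ xs then sVal idx (cs.getD s (none, 0)) else cs.getD s (none, 0) := by
  intro xs
  induction xs with
  | nil => intro _ cs s; simp
  | cons k ks ih =>
    intro hnd cs s
    have hnd' := List.nodup_cons.mp hnd
    simp only [List.foldl_cons]
    by_cases hs : s = k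
    · subst hs
      rw [ih hnd'.2 _ s, if_neg hnd'.1, sStep_getD_self, if_pos List.mem_cons_self]
    · rw [ih hnd'.2 _ s, sStep_getD_other idx cs k s hs]
      by_cases hin : s ∈ ks
      · rw [if_pos hin, if_pos (List.mem_cons_of_mem _ hin)]
      · rw [if_neg hin, if_neg (by simp [hs, hin])]

theorem singersfold_keys (idx : Int) (xs : List String) (cs) :
    (xs.foldl (sStep idx) cs).keys = PySem.Set.update cs.keys xs :=
  PySem.Dict.keys_foldl_insert xs
    (fun d x =>
      let v := d.getD x (none, 0)
      let v := if v.2 = 0 then (some idx, v.2) else v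
      (v.1, v.2 + 1)) cs

theorem singersfold_nodup (idx : Int) :
    ∀ (xs : List String) (cs), cs.keys.Nodup → (xs.foldl (sStep idx) cs).keys.Nodup := by
  intro xs
  induction xs with
  | nil => intro cs h; exact h
  | cons k ks ih =>
    intro cs h
    exact ih _ (PySem.Dict.nodup_keys_insert _ _ _ h)

-- ---- A-side invariant ----

def shortEnd (preds : List (List String)) (m : Int) (s : String) (b : Nat) : Prop :=
  s ∈ preds.getD b [] ∧ runF preds s b = 0 ∧ (runE preds s (b + 1) : Int) ≤ m

def endPair (preds : List (List String)) (s : String) (b : Nat) : Int × Int :=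
  ((b : Int) + 1 - runE preds s (b + 1), (b : Int))

def csVal (preds : List (List String)) (s : String) (t : Nat) : Option Int × Int :=
  if runE preds s t = 0 then (none, 0)
  else (some ((t : Int) - runE preds s t), (runE preds s t : Int))

def InvA (preds : List (List String)) (m : Int) (t : Nat)
    (st : PySem.Dict String (Option Int × Int) × PySem.Dict String (List (Int × Int))) : Prop :=
  (∀ s, st.1.getD s (none, 0) = csVal preds s t)
  ∧ (∀ s, runE preds s t ≠ 0 → st.1.contains s = true)
  ∧ st.1.keys.Nodup ∧ st.2.keys.Nodup
  ∧ (∀ s p, p ∈ st.2.getD s [] ↔ ∃ b : Nat, b + 2 ≤ t ∧ shortEnd preds m s b ∧ p = endPair preds s b)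

theorem sVal_csVal (preds : List (List String)) (s : String) (t : Nat) (hm : s ∈ preds.getD t []) :
    sVal (t : Int) (csVal preds s t) = csVal preds s (t + 1) := by
  have hE : runE preds s (t + 1) = runE preds s t + 1 := by simp only [runE]; rw [if_pos hm]
  by_cases hz : runE preds s t = 0
  · have hL : sVal (t : Int) (csVal preds s t) = (some (t : Int), 1) := by
      rw [csVal, if_pos hz, sVal]; norm_num
    have hR : csVal preds s (t + 1) = (some (t : Int), 1) := by
      rw [csVal, hE, hz, if_neg (by omega)]
      norm_num
    rw [hL, hR]
  · have hL : sVal (t : Int) (csVal preds s t)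
        = (some ((t : Int) - (runE preds s t : Int)), (runE preds s t : Int) + 1) := by
      rw [csVal, if_neg hz, sVal]
      simp only
      rw [if_neg (by exact_mod_cast hz)]
    have hR : csVal preds s (t + 1)
        = (some ((t : Int) - (runE preds s t : Int)), (runE preds s t : Int) + 1) := by
      rw [csVal, hE, if_neg (by omega)]
      refine Prod.ext ?_ ?_ <;> simp
    rw [hL, hR]

theorem stepA_inv (preds : List (List String)) (m : Int) (t : Nat) (st)
    (hinv : InvA preds m t st) (ht : t < preds.length) :
    InvA preds m (t + 1) (pvA_step m st ((t : Int), preds.getD t [])) := by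
  obtain ⟨h1, h2, h3, h4, h5⟩ := hinv
  have hstep : pvA_step m st ((t : Int), preds.getD t []) =
      ((PySem.Set.ofList (preds.getD t [])).foldl (sStep (t : Int))
        (st.1.keys.foldl (kStep (PySem.Set.ofList (preds.getD t [])) m (t : Int)) st).1,
       (st.1.keys.foldl (kStep (PySem.Set.ofList (preds.getD t [])) m (t : Int)) st).2) := rfl
  rw [hstep]
  set CS := PySem.Set.ofList (preds.getD t []) with hCSdef
  set st1 := st.1.keys.foldl (kStep CS m (t : Int)) st with hst1def
  have hmemCS : ∀ x : String, x ∈ CS ↔ x ∈ preds.getD t [] := fun x => PySem.Set.mem_ofList _ x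
  have hcontCS : ∀ x : String, PySem.Set.contains CS x = true ↔ x ∈ preds.getD t [] := by
    intro x; rw [PySem.Set.contains_iff]; exact hmemCS x
  have hndCS : CS.Nodup := PySem.Set.nodup_ofList _
  have hr := keysfold_pointwise CS m (t : Int) st.1.keys h3 st
  have hr1 : ∀ s, st1.1.getD s (none, 0)
      = if s ∈ st.1.keys then (kVal CS m (t : Int) s (st.1.getD s (none, 0)) (st.2.getD s [])).1
        else st.1.getD s (none, 0) := by
    intro s
    have h := hr s
    by_cases hk : s ∈ st.1.keys
    · rw [if_pos hk] at h; rw [if_pos hk]; exact congrArg Prod.fst h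
    · rw [if_neg hk] at h; rw [if_neg hk]; exact congrArg Prod.fst h
  have hr2 : ∀ s, st1.2.getD s []
      = if s ∈ st.1.keys then (kVal CS m (t : Int) s (st.1.getD s (none, 0)) (st.2.getD s [])).2
        else st.2.getD s [] := by
    intro s
    have h := hr s
    by_cases hk : s ∈ st.1.keys
    · rw [if_pos hk] at h; rw [if_pos hk]; exact congrArg Prod.snd h
    · rw [if_neg hk] at h; rw [if_neg hk]; exact congrArg Prod.snd h
  -- cs-reads after the keys loop, when s is in the current chunk or has no streak
  have hkeep : ∀ s, s ∈ preds.getD t [] ∨ runE preds s t = 0 →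
      st1.1.getD s (none, 0) = st.1.getD s (none, 0) ∧ st1.2.getD s [] = st.2.getD s [] := by
    intro s hs
    have hcond : ¬ (PySem.Set.contains CS s = false ∧ 0 < (st.1.getD s (none, 0)).2) := by
      rcases hs with hm | hz
      · rintro ⟨hcf, -⟩
        rw [(hcontCS s).mpr hm] at hcf
        exact Bool.noConfusion hcf
      · rintro ⟨-, hpos⟩
        rw [h1 s] at hpos
        unfold csVal at hpos
        rw [if_pos hz] at hpos
        exact absurd hpos (by norm_num)
    constructor
    · rw [hr1 s]
      by_cases hk : s ∈ st.1.keys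
      · rw [if_pos hk]; unfold kVal; rw [if_neg hcond]
      · rw [if_neg hk]
    · rw [hr2 s]
      by_cases hk : s ∈ st.1.keys
      · rw [if_pos hk]; unfold kVal; rw [if_neg hcond]
      · rw [if_neg hk]
  unfold InvA
  refine ⟨?_, ?_, ?_, ?_, ?_⟩
  · -- cs-values characterization at t+1
    intro s
    show (CS.foldl (sStep (t : Int)) st1.1).getD s (none, 0) = csVal preds s (t + 1)
    rw [singersfold_pointwise (t : Int) CS hndCS st1.1 s]
    by_cases hm : s ∈ preds.getD t []
    · rw [if_pos ((hmemCS s).mpr hm)]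
      rw [(hkeep s (Or.inl hm)).1, h1 s]
      exact sVal_csVal preds s t hm
    · have hE : runE preds s (t + 1) = 0 := by
        simp only [runE]; rw [if_neg hm]
      rw [if_neg (fun hq => hm ((hmemCS s).mp hq))]
      by_cases hz : runE preds s t = 0
      · rw [(hkeep s (Or.inr hz)).1, h1 s]
        unfold csVal
        rw [if_pos hz, if_pos hE]
      · have hk : s ∈ st.1.keys := (PySem.Dict.contains_iff_mem_keys _ s).mp (h2 s hz)
        have hcf : PySem.Set.contains CS s = false := by
          cases hq : PySem.Set.contains CS s with
          | false => rfl
          | true => exact absurd ((hcontCS s).mp hq) hm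
        have hv : st.1.getD s (none, 0) = (some ((t : Int) - runE preds s t), (runE preds s t : Int)) := by
          rw [h1 s]; unfold csVal; rw [if_neg hz]
        have hpos : (0 : Int) < ((runE preds s t : Nat) : Int) := by
          exact_mod_cast Nat.pos_of_ne_zero hz
        rw [hr1 s, if_pos hk, hv]
        have hkv : (kVal CS m (t : Int) s (some ((t : Int) - runE preds s t), (runE preds s t : Int))
            (st.2.getD s [])).1 = (none, 0) := by
          unfold kVal
          rw [if_pos ⟨hcf, hpos⟩]
        rw [hkv]
        unfold csVal
        rw [if_pos hE]
  · -- active streaks are keys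
    intro s hs
    show (CS.foldl (sStep (t : Int)) st1.1).contains s = true
    have hm : s ∈ preds.getD t [] := (runE_pos_iff preds s t).mp (Nat.pos_of_ne_zero hs)
    rw [PySem.Dict.contains_iff_mem_keys, singersfold_keys]
    rw [PySem.Set.mem_update]
    exact Or.inr ((hmemCS s).mpr hm)
  · exact singersfold_nodup (t : Int) CS _ (keysfold_nodup CS m (t : Int) st.1.keys st h3 h4).1
  · exact (keysfold_nodup CS m (t : Int) st.1.keys st h3 h4).2
  · -- ranges characterization at t+1
    intro s p
    show p ∈ st1.2.getD s [] ↔ _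
    by_cases hm : s ∈ preds.getD t []
    · rw [(hkeep s (Or.inl hm)).2, h5 s p]
      constructor
      · rintro ⟨b, hb, hse, hp⟩; exact ⟨b, by omega, hse, hp⟩
      · rintro ⟨b, hb, hse, hp⟩
        refine ⟨b, ?_, hse, hp⟩
        by_contra hlt
        have hbt : b + 1 = t := by omega
        have hF := hse.2.1
        rw [runF_def, hbt, if_pos ⟨ht, hm⟩] at hF
        omega
    · by_cases hz : runE preds s t = 0
      · rw [(hkeep s (Or.inr hz)).2, h5 s p]
        constructor
        · rintro ⟨b, hb, hse, hp⟩; exact ⟨b, by omega, hse, hp⟩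
        · rintro ⟨b, hb, hse, hp⟩
          refine ⟨b, ?_, hse, hp⟩
          by_contra hlt
          have hbt : b + 1 = t := by omega
          have := (runE_pos_iff preds s b).mpr hse.1
          rw [hbt] at this
          omega
      · have hk : s ∈ st.1.keys := (PySem.Dict.contains_iff_mem_keys _ s).mp (h2 s hz)
        have hcf : PySem.Set.contains CS s = false := by
          cases hq : PySem.Set.contains CS s with
          | false => rfl
          | true => exact absurd ((hcontCS s).mp hq) hm
        have hv : st.1.getD s (none, 0) = (some ((t : Int) - runE preds s t), (runE preds s t : Int)) := by
          rw [h1 s]; unfold csVal; rw [if_neg hz]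
        have ht1 : 1 ≤ t := by
          have h' := runE_le preds s t; omega
        have htt : (t - 1) + 1 = t := by omega
        have hpos : (0 : Int) < ((runE preds s t : Nat) : Int) := by
          exact_mod_cast Nat.pos_of_ne_zero hz
        rw [hr2 s, if_pos hk, hv]
        have hkv : (kVal CS m (t : Int) s (some ((t : Int) - runE preds s t), (runE preds s t : Int))
            (st.2.getD s [])).2
            = if (runE preds s t : Int) ≤ m
              then st.2.getD s [] ++ [((t : Int) - runE preds s t, (t : Int) - 1)]
              else st.2.getD s [] := by
          unfold kVal
          rw [if_pos ⟨hcf, hpos⟩]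
        rw [hkv]
        by_cases hsm : (runE preds s t : Int) ≤ m
        · rw [if_pos hsm]
          rw [List.mem_append, List.mem_singleton, h5 s p]
          constructor
          · rintro (⟨b, hb, hse, hp⟩ | hp)
            · exact ⟨b, by omega, hse, hp⟩
            · refine ⟨t - 1, by omega, ⟨?_, ?_, ?_⟩, ?_⟩
              · have hpi := runE_pos_iff preds s (t - 1)
                rw [htt] at hpi
                exact hpi.mp (Nat.pos_of_ne_zero hz)
              · rw [runF_def, htt, if_neg (fun hq => hm hq.2)]
              · rw [htt]; exact hsm
              · rw [hp]; unfold endPair; rw [htt]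
                refine Prod.ext ?_ ?_ <;> simp only <;> omega
          · rintro ⟨b, hb, hse, hp⟩
            by_cases hbt : b + 2 ≤ t
            · exact Or.inl ⟨b, hbt, hse, hp⟩
            · right
              have hbeq : b = t - 1 := by omega
              subst hbeq
              rw [hp]; unfold endPair; rw [htt]
              refine Prod.ext ?_ ?_ <;> simp only <;> omega
        · rw [if_neg hsm, h5 s p]
          constructor
          · rintro ⟨b, hb, hse, hp⟩; exact ⟨b, by omega, hse, hp⟩
          · rintro ⟨b, hb, hse, hp⟩
            refine ⟨b, ?_, hse, hp⟩
            by_contra hlt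
            have hbt : b + 1 = t := by omega
            have h' := hse.2.2
            rw [hbt] at h'
            exact hsm h'

theorem foldA_inv (preds : List (List String)) (m : Int) :
    InvA preds m preds.length
      ((PySem.List.enumerate preds 0).foldl (pvA_step m) (PySem.Dict.empty, PySem.Dict.empty)) := by
  have base : InvA preds m 0 (PySem.Dict.empty, PySem.Dict.empty) := by
    refine ⟨?_, ?_, ?_, ?_, ?_⟩
    · intro s
      show PySem.Dict.empty.getD s (none, 0) = csVal preds s 0
      rw [PySem.Dict.getD_empty]
      unfold csVal
      have h0 : runE preds s 0 = 0 := rfl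
      rw [if_pos h0]
    · intro s hs; exact absurd rfl hs
    · show PySem.Dict.empty.keys.Nodup
      rw [PySem.Dict.keys_empty]; exact List.nodup_nil
    · show PySem.Dict.empty.keys.Nodup
      rw [PySem.Dict.keys_empty]; exact List.nodup_nil
    · intro s p
      show p ∈ PySem.Dict.empty.getD s [] ↔ _
      rw [PySem.Dict.getD_empty]
      simp only [List.not_mem_nil, false_iff]
      rintro ⟨b, hb, -, -⟩
      omega
  have main : ∀ t, t ≤ preds.length →
      InvA preds m t (((PySem.List.enumerate preds 0).take t).foldl (pvA_step m)
        (PySem.Dict.empty, PySem.Dict.empty)) := by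
    intro t
    induction t with
    | zero => intro _; simpa using base
    | succ t ih =>
      intro ht
      have ht' : t < preds.length := by omega
      have htake : (PySem.List.enumerate preds 0).take (t + 1)
          = (PySem.List.enumerate preds 0).take t ++ [((t : Int), preds.getD t [])] := by
        rw [List.take_add_one, PySem.List.getElem?_enumerate]
        rw [List.getElem?_eq_getElem ht']
        simp only [Option.map_some, Option.toList_some]
        rw [List.getD_eq_getElem preds [] ht']
        norm_num
      rw [htake, List.foldl_append]
      simp only [List.foldl_cons, List.foldl_nil]
      exact stepA_inv preds m t _ (ih (by omega)) ht'
  have hfin := main preds.length le_rfl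
  rw [List.take_of_length_le (by rw [PySem.List.length_enumerate])] at hfin
  exact hfin

-- ---- lingering-streaks loop ----

def lStep (m : Int) (rr : PySem.Dict String (List (Int × Int)))
    (kv : String × (Option Int × Int)) : PySem.Dict String (List (Int × Int)) :=
  if 0 < kv.2.2 ∧ kv.2.2 ≤ m then
    match kv.2.1 with
    | some start => rr.modify kv.1 [] (fun l => l ++ [(start, start + kv.2.2 - 1)])
    | none => rr
  else rr

def addL (preds : List (List String)) (m : Int) (n : Nat) (s : String) : List (Int × Int) :=
  if runE preds s n ≠ 0 ∧ (runE preds s n : Int) ≤ m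
  then [((n : Int) - runE preds s n, (n : Int) - 1)] else []

theorem lStep_getD_other (m : Int) (rr) (kv : String × (Option Int × Int)) (s : String)
    (hx : s ≠ kv.1) : (lStep m rr kv).getD s [] = rr.getD s [] := by
  unfold lStep
  by_cases hc : 0 < kv.2.2 ∧ kv.2.2 ≤ m
  · rw [if_pos hc]
    cases hv : kv.2.1 with
    | none => rfl
    | some start =>
      simp only
      exact PySem.Dict.getD_modify_of_ne _ _ _ hx
  · rw [if_neg hc]

theorem lStep_getD_canon (preds : List (List String)) (m : Int) (n : Nat) (rr) (k : String) :
    (lStep m rr (k, csVal preds k n)).getD k [] = rr.getD k [] ++ addL preds m n k := by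
  unfold lStep addL csVal
  by_cases hz : runE preds k n = 0
  · rw [if_pos hz]
    have hc : ¬ (0 < ((none, 0) : Option Int × Int).2 ∧ ((none, 0) : Option Int × Int).2 ≤ m) := by
      rintro ⟨h, -⟩; exact absurd h (by norm_num)
    rw [if_neg hc, if_neg (by rintro ⟨h, -⟩; exact h hz)]
    simp
  · rw [if_neg hz]
    have hpos : (0 : Int) < ((runE preds k n : Nat) : Int) := by
      exact_mod_cast Nat.pos_of_ne_zero hz
    by_cases hsm : (runE preds k n : Int) ≤ m
    · rw [if_pos ⟨hpos, hsm⟩, if_pos ⟨hz, hsm⟩]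
      simp only
      rw [PySem.Dict.getD_modify_self]
      congr 2
      refine Prod.ext ?_ ?_ <;> simp only
      ring
    · rw [if_neg (by rintro ⟨-, h⟩; exact hsm h), if_neg (by rintro ⟨-, h⟩; exact hsm h)]
      simp

theorem lStep_nodup (m : Int) (rr) (kv : String × (Option Int × Int))
    (h : rr.keys.Nodup) : (lStep m rr kv).keys.Nodup := by
  unfold lStep
  by_cases hc : 0 < kv.2.2 ∧ kv.2.2 ≤ m
  · rw [if_pos hc]
    cases hv : kv.2.1 with
    | none => exact h
    | some start => exact nodup_keys_modify _ _ _ _ h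
  · rw [if_neg hc]; exact h

theorem lingerfold_nodup (m : Int) :
    ∀ (its : List (String × (Option Int × Int))) (rr), rr.keys.Nodup →
      (its.foldl (lStep m) rr).keys.Nodup := by
  intro its
  induction its with
  | nil => intro rr h; exact h
  | cons kv its ih => intro rr h; exact ih _ (lStep_nodup m rr kv h)

theorem lingerfold_getD (preds : List (List String)) (m : Int) (n : Nat) :
    ∀ (its : List (String × (Option Int × Int))), (its.map Prod.fst).Nodup →
      (∀ kv ∈ its, kv.2 = csVal preds kv.1 n) → ∀ (rr) (s : String),
      (its.foldl (lStep m) rr).getD s []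
        = rr.getD s [] ++ (if s ∈ its.map Prod.fst then addL preds m n s else []) := by
  intro its
  induction its with
  | nil => intro _ _ rr s; simp
  | cons kv its ih =>
    intro hnd hcan rr s
    rw [List.map_cons] at hnd ⊢
    have hnd' := List.nodup_cons.mp hnd
    simp only [List.foldl_cons]
    have hkv : kv = (kv.1, csVal preds kv.1 n) := by
      refine Prod.ext rfl ?_
      exact hcan kv (List.mem_cons_self)
    by_cases hs : s = kv.1
    · subst hs
      rw [ih hnd'.2 (fun x hx => hcan x (List.mem_cons_of_mem _ hx)) _ kv.1,
        if_neg hnd'.1]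
      conv_lhs => rw [hkv]
      rw [lStep_getD_canon]
      rw [if_pos List.mem_cons_self, List.append_nil]
    · rw [ih hnd'.2 (fun x hx => hcan x (List.mem_cons_of_mem _ hx)) _ s,
        lStep_getD_other m rr kv s hs]
      by_cases hin : s ∈ its.map Prod.fst
      · rw [if_pos hin, if_pos (List.mem_cons_of_mem _ hin)]
      · rw [if_neg hin, if_neg (by simp [hs, hin])]

-- lingering-streaks loop characterization
theorem linger_spec (preds : List (List String)) (m : Int) (st)
    (hinv : InvA preds m preds.length st) :
    (st.1.items.foldl (lStep m) st.2).keys.Nodup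
    ∧ ∀ (s : String) (p : Int × Int), p ∈ (st.1.items.foldl (lStep m) st.2).getD s []
        ↔ ∃ b : Nat, shortEnd preds m s b ∧ p = endPair preds s b := by
  obtain ⟨h1, h2, h3, h4, h5⟩ := hinv
  refine ⟨lingerfold_nodup m _ _ h4, ?_⟩
  intro s p
  have hcan : ∀ kv ∈ st.1.items, kv.2 = csVal preds kv.1 preds.length := by
    intro kv hkv
    have hmemi : (kv.1, kv.2) ∈ st.1.items := by rwa [Prod.mk.eta]
    have := PySem.Dict.getD_of_mem_items st.1 hmemi h3 (none, 0)
    rw [← this, h1 kv.1]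
  have hndf : (st.1.items.map Prod.fst).Nodup := h3
  rw [lingerfold_getD preds m preds.length st.1.items hndf hcan st.2 s]
  have hkeys : (s ∈ st.1.items.map Prod.fst) ↔ st.1.contains s = true := by
    rw [PySem.Dict.contains_iff_mem_keys]
    exact Iff.rfl
  by_cases hz : runE preds s preds.length = 0
  · have hadd : (if s ∈ st.1.items.map Prod.fst then addL preds m preds.length s else []) = [] := by
      by_cases hin : s ∈ st.1.items.map Prod.fst
      · rw [if_pos hin]; unfold addL; rw [if_neg (by rintro ⟨h, -⟩; exact h hz)]
      · rw [if_neg hin]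
    rw [hadd, List.append_nil, h5 s p]
    constructor
    · rintro ⟨b, hb, hse, hp⟩; exact ⟨b, hse, hp⟩
    · rintro ⟨b, hse, hp⟩
      refine ⟨b, ?_, hse, hp⟩
      have hbn : b < preds.length := mem_getD_lt preds s b hse.1
      by_contra hlt
      have hbt : b + 1 = preds.length := by omega
      have := (runE_pos_iff preds s b).mpr hse.1
      rw [hbt] at this
      omega
  · have hin : s ∈ st.1.items.map Prod.fst := hkeys.mpr (h2 s hz)
    have hn1 : 1 ≤ preds.length := by
      have := runE_le preds s preds.length; omega
    have htt : (preds.length - 1) + 1 = preds.length := by omega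
    rw [if_pos hin]
    unfold addL
    by_cases hsm : (runE preds s preds.length : Int) ≤ m
    · rw [if_pos ⟨hz, hsm⟩, List.mem_append, List.mem_singleton, h5 s p]
      constructor
      · rintro (⟨b, hb, hse, hp⟩ | hp)
        · exact ⟨b, hse, hp⟩
        · refine ⟨preds.length - 1, ⟨?_, ?_, ?_⟩, ?_⟩
          · have hpi := runE_pos_iff preds s (preds.length - 1)
            rw [htt] at hpi
            exact hpi.mp (Nat.pos_of_ne_zero hz)
          · rw [runF_def, htt, if_neg (by omega)]
          · rw [htt]; exact hsm
          · rw [hp]; unfold endPair; rw [htt]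
            refine Prod.ext ?_ ?_ <;> simp only <;> omega
      · rintro ⟨b, hse, hp⟩
        have hbn : b < preds.length := mem_getD_lt preds s b hse.1
        by_cases hbt : b + 2 ≤ preds.length
        · exact Or.inl ⟨b, hbt, hse, hp⟩
        · right
          have hbeq : b = preds.length - 1 := by omega
          subst hbeq
          rw [hp]; unfold endPair; rw [htt]
          refine Prod.ext ?_ ?_ <;> simp only <;> omega
    · rw [if_neg (by rintro ⟨-, h⟩; exact hsm h), List.append_nil, h5 s p]
      constructor
      · rintro ⟨b, hb, hse, hp⟩; exact ⟨b, hse, hp⟩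
      · rintro ⟨b, hse, hp⟩
        refine ⟨b, ?_, hse, hp⟩
        have hbn : b < preds.length := mem_getD_lt preds s b hse.1
        by_contra hlt
        have hbt : b + 1 = preds.length := by omega
        have h' := hse.2.2
        rw [hbt] at h'
        exact hsm h'

-- ---- deletion loops ----

def dStep (x : String) (cleaned : List (List String)) (i : Int) : List (List String) :=
  if x ∈ PySem.List.pyGetD cleaned i [] then
    PySem.List.pySetD cleaned i (List.filter (fun s => decide (s ≠ x)) (PySem.List.pyGetD cleaned i []))
  else cleaned

def rApply (x : String) (cleaned : List (List String)) (r : Int × Int) : List (List String) :=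
  (PySem.List.pyRange r.1 (r.2 + 1) 1).foldl (dStep x) cleaned

def sApply (cleaned : List (List String)) (kv : String × List (Int × Int)) : List (List String) :=
  kv.2.foldl (rApply kv.1) cleaned

def nStep (cleaned : List (List String)) (i : Int) : List (List String) :=
  if PySem.List.pyGetD cleaned i [] = [] then PySem.List.pySetD cleaned i ["None"] else cleaned

def coverP (rs : List (Int × Int)) (i : Nat) : Bool :=
  rs.any (fun p => decide (p.1 ≤ (i : Int) ∧ (i : Int) ≤ p.2))

def dualPred (its : List (String × List (Int × Int))) (i : Nat) (y : String) : Bool :=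
  !(its.any (fun kv => kv.1 == y && coverP kv.2 i))

theorem dStep_getElem? (x : String) (cl : List (List String)) (j : Int) (hj : 0 ≤ j) (i : Nat) :
    (dStep x cl j)[i]? = if (i : Int) = j then cl[i]?.map (List.filter (fun y => decide (y ≠ x)))
      else cl[i]? := by
  obtain ⟨jn, rfl⟩ : ∃ jn : Nat, j = (jn : Int) := ⟨j.toNat, (Int.toNat_of_nonneg hj).symm⟩
  unfold dStep
  rw [PySem.List.pyGetD_natCast]
  by_cases hlt : jn < cl.length
  · have hget : cl.getD jn [] = cl[jn] := List.getD_eq_getElem cl [] hlt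
    rw [hget]
    by_cases hmem : x ∈ cl[jn]
    · rw [if_pos hmem, PySem.List.pySetD_of_nonneg _ _ (Int.natCast_nonneg jn)]
      simp only [Int.toNat_natCast]
      rw [List.getElem?_set]
      by_cases hij : (i : Int) = (jn : Int)
      · have hji : jn = i := by omega
        subst hji
        rw [if_pos rfl, if_pos hlt, if_pos hij, List.getElem?_eq_getElem hlt]
        rfl
      · rw [if_neg (by omega), if_neg hij]
    · rw [if_neg hmem]
      by_cases hij : (i : Int) = (jn : Int)
      · have hji : jn = i := by omega
        subst hji
        rw [if_pos hij, List.getElem?_eq_getElem hlt]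
        simp only [Option.map_some]
        congr 1
        exact (List.filter_eq_self.mpr (fun a ha =>
          decide_eq_true (show a ≠ x from fun he => hmem (by rw [← he]; exact ha)))).symm
      · rw [if_neg hij]
  · have hget : cl.getD jn [] = [] := List.getD_eq_default _ _ (by omega)
    rw [hget, if_neg List.not_mem_nil]
    by_cases hij : (i : Int) = (jn : Int)
    · rw [if_pos hij, List.getElem?_eq_none (by omega)]
      rfl
    · rw [if_neg hij]

theorem rangefold_del (x : String) : ∀ (n : Nat) (a b : Int), 0 ≤ a → (b - a).toNat ≤ n →
    ∀ (cl : List (List String)) (i : Nat),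
    ((PySem.List.pyRange a b).foldl (dStep x) cl)[i]?
      = if a ≤ (i : Int) ∧ (i : Int) < b then cl[i]?.map (List.filter (fun y => decide (y ≠ x)))
        else cl[i]? := by
  intro n
  induction n with
  | zero =>
    intro a b ha hn cl i
    rw [PySem.List.pyRange_one_eq_nil (by omega)]
    simp only [List.foldl_nil]
    rw [if_neg (by omega)]
  | succ n ih =>
    intro a b ha hn cl i
    by_cases hab : a < b
    · rw [PySem.List.pyRange_one_cons hab]
      simp only [List.foldl_cons]
      rw [ih (a + 1) b (by omega) (by omega) _ i, dStep_getElem? x cl a ha i]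
      by_cases h1 : (a + 1) ≤ (i : Int) ∧ (i : Int) < b
      · rw [if_pos h1, if_neg (by omega), if_pos (by omega)]
      · rw [if_neg h1]
        by_cases h2 : (i : Int) = a
        · rw [if_pos h2, if_pos (by omega)]
        · rw [if_neg h2, if_neg (by omega)]
    · rw [PySem.List.pyRange_one_eq_nil (by omega)]
      simp only [List.foldl_nil]
      rw [if_neg (by omega)]

theorem filter_idem (p : String → Bool) (l : List String) :
    List.filter p (List.filter p l) = List.filter p l := by
  rw [List.filter_filter]
  simp

theorem rangesfold_del (x : String) : ∀ (rs : List (Int × Int)), (∀ p ∈ rs, 0 ≤ p.1) →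
    ∀ (cl : List (List String)) (i : Nat),
    (rs.foldl (rApply x) cl)[i]?
      = if coverP rs i then cl[i]?.map (List.filter (fun y => decide (y ≠ x))) else cl[i]? := by
  intro rs
  induction rs with
  | nil =>
    intro _ cl i
    simp only [List.foldl_nil]
    rw [if_neg (by simp [coverP])]
  | cons r rs ih =>
    intro h0 cl i
    simp only [List.foldl_cons]
    rw [ih (fun p hp => h0 p (List.mem_cons_of_mem _ hp)) _ i]
    have hr : (rApply x cl r)[i]?
        = if r.1 ≤ (i : Int) ∧ (i : Int) < r.2 + 1
          then cl[i]?.map (List.filter (fun y => decide (y ≠ x))) else cl[i]? :=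
      rangefold_del x (r.2 + 1 - r.1).toNat r.1 (r.2 + 1) (h0 r List.mem_cons_self) le_rfl cl i
    have hcov : coverP (r :: rs) i = true ↔ (r.1 ≤ (i : Int) ∧ (i : Int) ≤ r.2) ∨ coverP rs i = true := by
      unfold coverP
      simp
    by_cases c1 : r.1 ≤ (i : Int) ∧ (i : Int) ≤ r.2
    · have hr' : (rApply x cl r)[i]? = cl[i]?.map (List.filter (fun y => decide (y ≠ x))) := by
        rw [hr, if_pos (by omega)]
      by_cases c2 : coverP rs i = true
      · rw [if_pos c2, hr', Option.map_map, if_pos (hcov.mpr (Or.inl c1))]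
        congr 1
        exact funext fun l => filter_idem _ l
      · rw [if_neg c2, hr', if_pos (hcov.mpr (Or.inl c1))]
    · have hr' : (rApply x cl r)[i]? = cl[i]? := by
        rw [hr, if_neg (by omega)]
      by_cases c2 : coverP rs i = true
      · rw [if_pos c2, hr', if_pos (hcov.mpr (Or.inr c2))]
      · rw [if_neg c2, hr', if_neg (by rw [hcov]; rintro (h | h) <;> [exact c1 h; exact c2 h])]

theorem itemsfold_del : ∀ (its : List (String × List (Int × Int))),
    (∀ kv ∈ its, ∀ p ∈ kv.2, 0 ≤ p.1) → ∀ (cl : List (List String)) (i : Nat),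
    (its.foldl sApply cl)[i]? = cl[i]?.map (List.filter (dualPred its i)) := by
  intro its
  induction its with
  | nil =>
    intro _ cl i
    have hp : dualPred [] i = fun _ => true := funext fun y => by simp [dualPred]
    rw [hp]
    simp only [List.foldl_nil]
    cases hq : cl[i]? with
    | none => rfl
    | some l => simp
  | cons kv its ih =>
    intro h0 cl i
    simp only [List.foldl_cons]
    rw [ih (fun x hx => h0 x (List.mem_cons_of_mem _ hx)) _ i]
    have hs : sApply cl kv = kv.2.foldl (rApply kv.1) cl := rfl
    rw [hs, rangesfold_del kv.1 kv.2 (h0 kv List.mem_cons_self) cl i]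
    by_cases hc : coverP kv.2 i = true
    · rw [if_pos hc, Option.map_map]
      congr 1
      funext l
      simp only [Function.comp_apply, List.filter_filter]
      apply List.filter_congr
      intro y _
      have hbe : (kv.1 == y) = decide (y = kv.1) := by
        by_cases h : y = kv.1
        · subst h; simp
        · rw [beq_eq_false_iff_ne.mpr (fun hh => h hh.symm)]
          simp [h]
      simp [dualPred, hc, Bool.and_comm, hbe]
    · rw [if_neg hc]
      congr 1
      funext l
      apply List.filter_congr
      intro y _
      simp [dualPred, hc]

theorem nStep_getElem? (cl : List (List String)) (j : Int) (hj : 0 ≤ j) (i : Nat) :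
    (nStep cl j)[i]? = if (i : Int) = j then cl[i]?.map (fun c => if c = [] then ["None"] else c)
      else cl[i]? := by
  obtain ⟨jn, rfl⟩ : ∃ jn : Nat, j = (jn : Int) := ⟨j.toNat, (Int.toNat_of_nonneg hj).symm⟩
  unfold nStep
  rw [PySem.List.pyGetD_natCast]
  by_cases hlt : jn < cl.length
  · have hget : cl.getD jn [] = cl[jn] := List.getD_eq_getElem cl [] hlt
    rw [hget]
    by_cases hmem : cl[jn] = []
    · rw [if_pos hmem, PySem.List.pySetD_of_nonneg _ _ (Int.natCast_nonneg jn)]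
      simp only [Int.toNat_natCast]
      rw [List.getElem?_set]
      by_cases hij : (i : Int) = (jn : Int)
      · have hji : jn = i := by omega
        subst hji
        rw [if_pos rfl, if_pos hlt, if_pos hij, List.getElem?_eq_getElem hlt]
        simp [hmem]
      · rw [if_neg (by omega), if_neg hij]
    · rw [if_neg hmem]
      by_cases hij : (i : Int) = (jn : Int)
      · have hji : jn = i := by omega
        subst hji
        rw [if_pos hij, List.getElem?_eq_getElem hlt]
        simp [hmem]
      · rw [if_neg hij]
  · have hget : cl.getD jn [] = [] := List.getD_eq_default _ _ (by omega)
    rw [hget, if_pos rfl, PySem.List.pySetD_of_nonneg _ _ (Int.natCast_nonneg jn)]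
    simp only [Int.toNat_natCast]
    rw [List.getElem?_set]
    by_cases hij : (i : Int) = (jn : Int)
    · have hji : jn = i := by omega
      subst hji
      rw [if_pos rfl, if_neg (by omega), if_pos hij, List.getElem?_eq_none (by omega)]
      rfl
    · rw [if_neg (by omega), if_neg hij]

theorem nonefold : ∀ (n : Nat) (a b : Int), 0 ≤ a → (b - a).toNat ≤ n →
    ∀ (cl : List (List String)) (i : Nat),
    ((PySem.List.pyRange a b).foldl nStep cl)[i]?
      = if a ≤ (i : Int) ∧ (i : Int) < b then cl[i]?.map (fun c => if c = [] then ["None"] else c)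
        else cl[i]? := by
  intro n
  induction n with
  | zero =>
    intro a b ha hn cl i
    rw [PySem.List.pyRange_one_eq_nil (by omega)]
    simp only [List.foldl_nil]
    rw [if_neg (by omega)]
  | succ n ih =>
    intro a b ha hn cl i
    by_cases hab : a < b
    · rw [PySem.List.pyRange_one_cons hab]
      simp only [List.foldl_cons]
      rw [ih (a + 1) b (by omega) (by omega) _ i, nStep_getElem? cl a ha i]
      by_cases h1 : (a + 1) ≤ (i : Int) ∧ (i : Int) < b
      · rw [if_pos h1, if_neg (by omega), if_pos (by omega)]
      · rw [if_neg h1]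
        by_cases h2 : (i : Int) = a
        · rw [if_pos h2, if_pos (by omega)]
        · rw [if_neg h2, if_neg (by omega)]
    · rw [PySem.List.pyRange_one_eq_nil (by omega)]
      simp only [List.foldl_nil]
      rw [if_neg (by omega)]

-- covered indices are exactly the members of short maximal runs
theorem cover_iff (preds : List (List String)) (m : Int)
    (rrF : PySem.Dict String (List (Int × Int))) (hnd : rrF.keys.Nodup)
    (hch : ∀ (s : String) (p : Int × Int), p ∈ rrF.getD s []
      ↔ ∃ b : Nat, shortEnd preds m s b ∧ p = endPair preds s b)
    (i : Nat) (y : String) :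
    (∃ kv ∈ rrF.items, kv.1 = y ∧ coverP kv.2 i = true)
      ↔ (y ∈ preds.getD i [] ∧ (runE preds y (i + 1) : Int) + (runF preds y i : Int) ≤ m) := by
  constructor
  · rintro ⟨kv, hkv, hky, hcv⟩
    obtain ⟨p, hp, hc1, hc2⟩ : ∃ p ∈ kv.2, p.1 ≤ (i : Int) ∧ (i : Int) ≤ p.2 := by
      simpa [coverP] using hcv
    subst hky
    have hmemi : (kv.1, kv.2) ∈ rrF.items := by rwa [Prod.mk.eta]
    have hv : rrF.getD kv.1 [] = kv.2 := PySem.Dict.getD_of_mem_items rrF hmemi hnd []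
    rw [← hv] at hp
    obtain ⟨b, hse, rfl⟩ := (hch kv.1 p).mp hp
    unfold endPair at hc1 hc2
    simp only at hc1 hc2
    have hib : i ≤ b := by omega
    have hlt : b - i < runE preds kv.1 (b + 1) := by omega
    have hmem : kv.1 ∈ preds.getD i [] := by
      have h := run_mem_back preds kv.1 (b - i) b hlt
      rwa [show b - (b - i) = i by omega] at h
    have hall : ∀ k, k ≤ b - i → kv.1 ∈ preds.getD (i + k) [] := by
      intro k hk
      have h2 : b - (i + k) < runE preds kv.1 (b + 1) := by omega
      have h := run_mem_back preds kv.1 (b - (i + k)) b h2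
      rwa [show b - (b - (i + k)) = i + k by omega] at h
    have htot := tot_const preds kv.1 i (b - i) hall
    rw [show i + (b - i) = b by omega] at htot
    have hF0 := hse.2.1
    have hEm := hse.2.2
    exact ⟨hmem, by omega⟩
  · rintro ⟨hmem, htotle⟩
    have hmb : y ∈ preds.getD (i + runF preds y i) [] :=
      run_mem_fwd preds y (runF preds y i) i le_rfl hmem
    have hF0 : runF preds y (i + runF preds y i) = 0 := runF_end preds y i
    have htot := tot_const preds y i (runF preds y i)
      (fun k hk => run_mem_fwd preds y k i hk hmem)
    have hse : shortEnd preds m y (i + runF preds y i) := ⟨hmb, hF0, by omega⟩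
    have hp : endPair preds y (i + runF preds y i) ∈ rrF.getD y [] :=
      (hch y _).mpr ⟨_, hse, rfl⟩
    have hne : rrF.getD y [] ≠ [] := by
      intro h
      rw [h] at hp
      exact List.not_mem_nil hp
    have hget : rrF.get? y = some (rrF.getD y []) := by
      cases hq : rrF.get? y with
      | none =>
        rw [PySem.Dict.getD_eq_get?_getD, hq] at hne
        simp at hne
      | some l => rw [PySem.Dict.getD_eq_get?_getD, hq]; rfl
    refine ⟨(y, rrF.getD y []), PySem.Dict.mem_items_of_get?_eq_some rrF hget, rfl, ?_⟩
    have hE1 : runE preds y (i + 1) ≠ 0 := by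
      have := (runE_pos_iff preds y i).mpr hmem
      omega
    have hcov : (endPair preds y (i + runF preds y i)).1 ≤ (i : Int)
        ∧ (i : Int) ≤ (endPair preds y (i + runF preds y i)).2 := by
      unfold endPair
      simp only
      constructor <;> omega
    simp only [coverP, List.any_eq_true]
    exact ⟨_, hp, decide_eq_true hcov⟩

-- ===== VERDICT (by name: the statement is the Claim_ definition above) =====
theorem cleanShortSingers_spec : Claim_equal_cleanShortSingers := by
  unfold Claim_equal_cleanShortSingers
  intro preds m _
  unfold Spec_cleanShortSingers
  have hInv := foldA_inv preds m
  obtain ⟨hnd, hch⟩ := linger_spec preds m _ hInv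
  have hA : cleanShortSingers preds m
      = (PySem.List.pyRange 0
          ((((PySem.List.enumerate preds 0).foldl (pvA_step m)
              (PySem.Dict.empty, PySem.Dict.empty)).1.items.foldl (lStep m)
              ((PySem.List.enumerate preds 0).foldl (pvA_step m)
                (PySem.Dict.empty, PySem.Dict.empty)).2).items.foldl sApply
            (preds.map (fun chunk => chunk))).length 1).foldl nStep
          ((((PySem.List.enumerate preds 0).foldl (pvA_step m)
              (PySem.Dict.empty, PySem.Dict.empty)).1.items.foldl (lStep m)
              ((PySem.List.enumerate preds 0).foldl (pvA_step m)
                (PySem.Dict.empty, PySem.Dict.empty)).2).items.foldl sApply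
            (preds.map (fun chunk => chunk))) := rfl
  rw [hA, List.map_id' preds]
  set rrF := ((PySem.List.enumerate preds 0).foldl (pvA_step m)
      (PySem.Dict.empty, PySem.Dict.empty)).1.items.foldl (lStep m)
      ((PySem.List.enumerate preds 0).foldl (pvA_step m)
        (PySem.Dict.empty, PySem.Dict.empty)).2 with hrrF
  set cl2 := rrF.items.foldl sApply preds with hcl2
  have h0 : ∀ kv ∈ rrF.items, ∀ p ∈ kv.2, 0 ≤ p.1 := by
    intro kv hkv p hp
    have hmemi : (kv.1, kv.2) ∈ rrF.items := by rwa [Prod.mk.eta]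
    have hv : rrF.getD kv.1 [] = kv.2 := PySem.Dict.getD_of_mem_items rrF hmemi hnd []
    rw [← hv] at hp
    obtain ⟨b, hse, rfl⟩ := (hch kv.1 p).mp hp
    have := runE_le preds kv.1 (b + 1)
    unfold endPair
    simp only
    omega
  apply List.ext_getElem?
  intro i
  have hdel : cl2[i]? = preds[i]?.map (List.filter (dualPred rrF.items i)) :=
    itemsfold_del rrF.items h0 preds i
  have hnone : ((PySem.List.pyRange 0 (cl2.length : Int) 1).foldl nStep cl2)[i]?
      = cl2[i]?.map (fun c => if c = [] then ["None"] else c) := by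
    have h := nonefold cl2.length 0 (cl2.length : Int) (by omega) (by omega) cl2 i
    by_cases hi : i < cl2.length
    · rw [h, if_pos ⟨by omega, by exact_mod_cast hi⟩]
    · rw [h, if_neg (by omega), List.getElem?_eq_none (by omega)]
      rfl
  rw [hnone, hdel, Option.map_map]
  -- B side
  have hB : (cleanShortSingers_alt preds m)[i]?
      = preds[i]?.map (fun chunk =>
          (fun p : Int × List String =>
            let kept := p.2.filter (fun s =>
              decide (m < ((pvB_back (preds.map PySem.Set.ofList) s p.1.toNat + 1
                + pvB_fwd (preds.map PySem.Set.ofList) s p.1.toNat : Nat) : Int)))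
            if kept = [] then ["None"] else kept) ((0 : Int) + (i : Int), chunk)) := by
    unfold cleanShortSingers_alt
    rw [List.getElem?_map, PySem.List.getElem?_enumerate, Option.map_map]
    rfl
  rw [hB]
  cases hp : preds[i]? with
  | none => rfl
  | some chunk =>
    obtain ⟨hlt, hchunk⟩ := List.getElem?_eq_some_iff.mp hp
    have hgetD : preds.getD i [] = chunk := by
      rw [List.getD_eq_getElem preds [] hlt, hchunk]
    simp only [Option.map_some, Function.comp_apply]
    have htn : ((0 : Int) + (i : Int)).toNat = i := by omega
    have hfilter : chunk.filter (dualPred rrF.items i)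
        = chunk.filter (fun s =>
            decide (m < ((pvB_back (preds.map PySem.Set.ofList) s i + 1
              + pvB_fwd (preds.map PySem.Set.ofList) s i : Nat) : Int))) := by
      apply List.filter_congr
      intro y hy
      have hmem : y ∈ preds.getD i [] := by rw [hgetD]; exact hy
      have hcv := cover_iff preds m rrF hnd hch i y
      have hdp : dualPred rrF.items i y = true
          ↔ ¬ ∃ kv ∈ rrF.items, kv.1 = y ∧ coverP kv.2 i = true := by
        unfold dualPred
        rw [Bool.not_eq_true', List.any_eq_false]
        constructor
        · rintro h ⟨kv, hkv, hk, hc⟩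
          have h' := h kv hkv
          rw [hk] at h'
          simp [hc] at h'
        · intro h kv hkv
          by_cases hk : kv.1 = y
          · have hc : coverP kv.2 i = false := by
              by_contra hc'
              exact h ⟨kv, hkv, hk, by simpa using hc'⟩
            simp [hk, hc]
          · simp [hk]
      have hEi : runE preds y (i + 1) = runE preds y i + 1 := by
        simp only [runE]; rw [if_pos hmem]
      rw [Bool.eq_iff_iff, hdp, hcv, decide_eq_true_iff, back_eq, fwd_eq]
      constructor
      · intro h
        have h2 : ¬ ((runE preds y (i + 1) : Int) + (runF preds y i : Int) ≤ m) := fun hc => h ⟨hmem, hc⟩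
        rw [hEi] at h2
        push_cast at h2 ⊢
        omega
      · intro h hc
        have := hc.2
        rw [hEi] at this
        push_cast at this h
        omega
    rw [htn, hfilter]
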